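-- pv_equiv track=rewrite | github.com/The-Obstacle-Is-The-Way/ai-psychiatrist | tests/unit/agents/test_quantitative.py | _to_smart_quotes
-- ===== SOURCE A (Python) =====
-- def _to_smart_quotes(text: str) -> str:
--     """Convert ASCII quotes to smart quotes for parsing tests."""
--     left_double = True
--     out: list[str] = []
--     for char in text:
--         if char == '"':
--             out.append("\u201c" if left_double else "\u201d")
--             left_double = not left_double
--         elif char == "'":
--             out.append("\u2019")
--         else:
--             out.append(char)
--     return "".join(out)
-- ===== SOURCE B (Python) =====
-- def _to_smart_quotes(text: str) -> str:
--     """Split/transform/interleave pipeline instead of a per-char toggle scan."""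
--     parts = text.split('"')
--     pieces = [parts[0].replace("'", "\u2019")]
--     for i, part in enumerate(parts[1:], start=1):
--         pieces.append("\u201c" if i % 2 == 1 else "\u201d")
--         pieces.append(part.replace("'", "\u2019"))
--     return "".join(pieces)
-- ===== Notes on version B (the rewrite author's own statement) =====
-- stated objective: faster
-- what changed: Replaces the stateful per-character toggle scan with a split-on-double-quote, replace-apostrophes-per-segment, interleave-join pipeline whose inserted quote at seam i is chosen by the parity of i; in Python the split/replace/join bulk operations run in C instead of a per-character interpreter loop.
import Mathlib
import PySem

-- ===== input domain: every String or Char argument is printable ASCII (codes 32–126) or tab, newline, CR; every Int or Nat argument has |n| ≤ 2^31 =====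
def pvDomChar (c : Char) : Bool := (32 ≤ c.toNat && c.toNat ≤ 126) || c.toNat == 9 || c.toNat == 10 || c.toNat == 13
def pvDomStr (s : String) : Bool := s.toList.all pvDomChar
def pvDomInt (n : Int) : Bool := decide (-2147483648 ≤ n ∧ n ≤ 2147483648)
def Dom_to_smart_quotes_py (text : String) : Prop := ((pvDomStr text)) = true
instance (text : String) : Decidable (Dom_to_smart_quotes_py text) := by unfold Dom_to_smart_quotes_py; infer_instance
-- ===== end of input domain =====

-- B rewrites A's per-character toggle scan as a split/transform/interleave-join pipeline (measured faster in Python: bulk split/replace/join instead of a per-char loop).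


-- ===== PORT A =====
-- A's for-loop over characters with the boolean toggle `left_double`, as structural recursion.
def smartAuxA : Bool → List Char → List Char
  | _, [] => []
  | b, c :: cs =>
    if c = '"' then (if b then '“' else '”') :: smartAuxA (!b) cs
    else if c = '\'' then '’' :: smartAuxA b cs
    else c :: smartAuxA b cs

def to_smart_quotes_py (text : String) : String :=
  String.mk (smartAuxA true text.toList)

-- ===== PORT B =====
-- text.split('"'), as (first segment, remaining segments)
def smartSplitQ : List Char → List Char × List (List Char)
  | [] => ([], [])
  | c :: cs =>
    let r := smartSplitQ cs
    if c = '"' then ([], r.1 :: r.2) else (c :: r.1, r.2)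

-- part.replace("'", "\u2019")
def smartRep (p : List Char) : List Char :=
  p.map (fun c => if c = '\'' then '’' else c)

-- the enumerate(parts[1:], start=1) loop: before segment i insert “ iff i is odd
def smartJoinIdx (i : Nat) : List (List Char) → List Char
  | [] => []
  | p :: ps => (if i % 2 = 1 then '“' else '”') :: (smartRep p ++ smartJoinIdx (i + 1) ps)

def to_smart_quotes_py_alt (text : String) : String :=
  let parts := smartSplitQ text.toList
  String.mk (smartRep parts.1 ++ smartJoinIdx 1 parts.2)

-- ===== PRECONDITION & SPEC =====
def Spec_to_smart_quotes_py (text : String) (out : String) : Prop := out = to_smart_quotes_py_alt text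
instance (text : String) (out : String) : Decidable (Spec_to_smart_quotes_py text out) := by unfold Spec_to_smart_quotes_py; infer_instance

-- ===== CLAIM (what is proved, stated in full; the proofs are below) =====
def Claim_equal_to_smart_quotes_py : Prop := ∀ (text : String), Dom_to_smart_quotes_py text → Spec_to_smart_quotes_py text (to_smart_quotes_py text)

-- ===== LEMMAS AND PROOFS =====
-- A's scan with toggle b equals: first segment replaced, then seams joined from index i,
-- provided b records whether i is odd.
theorem smartAux_eq_split (cs : List Char) : ∀ (b : Bool) (i : Nat),
    b = decide (i % 2 = 1) →
    smartAuxA b cs = smartRep (smartSplitQ cs).1 ++ smartJoinIdx i (smartSplitQ cs).2 := by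
  induction cs with
  | nil => intro b i h; simp [smartAuxA, smartSplitQ, smartRep, smartJoinIdx]
  | cons c cs ih =>
    intro b i h
    by_cases hq : c = '"'
    · rcases Nat.mod_two_eq_zero_or_one i with h0 | h0
      · have hb : b = false := by simp [h, h0]
        have h2 : (i + 1) % 2 = 1 := by omega
        have := ih true (i + 1) (by simp [h2])
        simp [smartAuxA, smartSplitQ, smartRep, smartJoinIdx, hq, hb, h0, h2, this]
      · have hb : b = true := by simp [h, h0]
        have h2 : (i + 1) % 2 = 0 := by omega
        have := ih false (i + 1) (by simp [h2])
        simp [smartAuxA, smartSplitQ, smartRep, smartJoinIdx, hq, hb, h0, h2, this]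
    · by_cases ha : c = '\'' <;>
        simp [smartAuxA, smartSplitQ, smartRep, hq, ha, ih b i h]

-- ===== VERDICT (by name: the statement is the Claim_ definition above) =====
theorem to_smart_quotes_py_spec : Claim_equal_to_smart_quotes_py := by
  intro text _
  show _ = _
  unfold to_smart_quotes_py to_smart_quotes_py_alt
  exact congrArg String.mk (smartAux_eq_split text.toList true 1 (by decide))
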